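-- pv_equiv track=rewrite | github.com/027Codice720/Reto-BDB | Reto2.py | squared_sorted_array
-- ===== SOURCE A (Python) =====
-- def squared_sorted_array(array, S):
--     # Definimos el rango máximo permitido
--     max_range = int(str(S) + str(S))  # Concatenar S consigo mismo y convertir a entero
--
--     # Lista para almacenar cuadrados válidos
--     squared_array = []
--
--     # Validar y calcular cuadrados
--     for num in array:
--         square = num * num  # Calcular el cuadrado
--         if 0 <= square <= max_range:  # Verificar que esté dentro del rango
--             squared_array.append(square)
--
--     # Ordenar con Bubble Sort
--     n = len(squared_array)
--     for i in range(n - 1):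
--         for j in range(0, n - i - 1):
--             if squared_array[j] > squared_array[j + 1]:  # Comparar y ordenar ascendente
--                 temp = squared_array[j]
--                 squared_array[j] = squared_array[j + 1]
--                 squared_array[j + 1] = temp
--     return squared_array
-- ===== SOURCE B (Python) =====
-- def _merge(a, b):
--     # merge two ascending lists, stable: take from a on ties
--     if not a:
--         return b
--     if not b:
--         return a
--     if a[0] > b[0]:
--         return [b[0]] + _merge(a, b[1:])
--     return [a[0]] + _merge(a[1:], b)
--
--
-- def _msort(l):
--     if len(l) <= 1:
--         return l
--     mid = len(l) // 2
--     return _merge(_msort(l[:mid]), _msort(l[mid:]))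
--
--
-- def squared_sorted_array(array, S):
--     max_range = int(str(S) + str(S))
--     squares = [num * num for num in array if 0 <= num * num <= max_range]
--     return _msort(squares)
-- ===== Notes on version B (the rewrite author's own statement) =====
-- stated objective: faster
-- what changed: The filtering loop becomes a comprehension and the in-place bubble sort is replaced by a recursive top-down merge sort (split at the midpoint, merge by comparing front elements).
import Mathlib
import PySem

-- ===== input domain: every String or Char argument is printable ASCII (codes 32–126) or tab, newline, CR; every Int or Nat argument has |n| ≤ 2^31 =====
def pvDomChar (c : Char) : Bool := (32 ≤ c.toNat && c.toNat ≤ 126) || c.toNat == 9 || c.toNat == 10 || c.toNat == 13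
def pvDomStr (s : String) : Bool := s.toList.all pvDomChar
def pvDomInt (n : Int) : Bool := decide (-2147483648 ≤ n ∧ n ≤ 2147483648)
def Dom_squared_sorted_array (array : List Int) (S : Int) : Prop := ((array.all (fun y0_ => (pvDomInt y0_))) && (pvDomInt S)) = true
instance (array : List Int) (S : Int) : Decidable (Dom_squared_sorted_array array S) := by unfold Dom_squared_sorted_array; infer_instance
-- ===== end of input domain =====

-- B replaces A's in-place bubble sort by a recursive top-down merge sort (and the append
-- loop by a comprehension); proved to return the same list wherever A returns (S ≥ 0).

-- ===== PORT A =====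
-- one bubble-sort step: compare squared_array[j] with squared_array[j+1] and swap
def pvSwapStep (a : List Int) (j : Int) : List Int :=
  if PySem.List.pyGetD a j 0 > PySem.List.pyGetD a (j + 1) 0 then
    let temp := PySem.List.pyGetD a j 0
    PySem.List.pySetD (PySem.List.pySetD a j (PySem.List.pyGetD a (j + 1) 0)) (j + 1) temp
  else a

def squared_sorted_array (array : List Int) (S : Int) : List Int :=
  match PySem.Int.ofStr? (PySem.Int.toStr S ++ PySem.Int.toStr S) with
  | none => []   -- Python raises ValueError here (S < 0); excluded by Pre_
  | some maxRange =>
    let squared := array.foldl (fun acc num =>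
      let square := num * num
      if 0 ≤ square ∧ square ≤ maxRange then acc ++ [square] else acc) []
    let n : Int := (squared.length : Int)
    (PySem.List.pyRange 0 (n - 1)).foldl (fun a i =>
      (PySem.List.pyRange 0 (n - i - 1)).foldl pvSwapStep a) squared

-- ===== PORT B =====
-- merge two ascending lists (the while loop of Source B's _merge, consuming the fronts)
def pvMerge : List Int → List Int → List Int
  | [], b => b
  | a, [] => a
  | x :: xs, y :: ys =>
    if x > y then y :: pvMerge (x :: xs) ys else x :: pvMerge xs (y :: ys)

-- Source B's _msort: split at the midpoint, sort both halves, merge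
def pvMsort (l : List Int) : List Int :=
  if l.length ≤ 1 then l
  else pvMerge (pvMsort (l.take (l.length / 2))) (pvMsort (l.drop (l.length / 2)))
termination_by l.length
decreasing_by
  · simp only [List.length_take]; omega
  · simp only [List.length_drop]; omega

def squared_sorted_array_alt (array : List Int) (S : Int) : List Int :=
  match PySem.Int.ofStr? (PySem.Int.toStr S ++ PySem.Int.toStr S) with
  | none => []   -- Source B raises the same ValueError here; excluded by Pre_
  | some maxRange =>
    pvMsort (array.filterMap (fun num =>
      if 0 ≤ num * num ∧ num * num ≤ maxRange then some (num * num) else none))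

-- ===== PRECONDITION & SPEC =====
-- Pre_ excludes S < 0, where int(str(S) + str(S)) raises ValueError in A (and in B alike).
def Pre_squared_sorted_array (array : List Int) (S : Int) : Prop := 0 ≤ S
instance (array : List Int) (S : Int) : Decidable (Pre_squared_sorted_array array S) := by
  unfold Pre_squared_sorted_array; infer_instance

def pvWitness_squared_sorted_array : List Int × Int := ([3, -2, 0, 10, 5], 4)

def Spec_squared_sorted_array (array : List Int) (S : Int) (out : List Int) : Prop :=
  out = squared_sorted_array_alt array S
instance (array : List Int) (S : Int) (out : List Int) : Decidable (Spec_squared_sorted_array array S out) := by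
  unfold Spec_squared_sorted_array; infer_instance

-- ===== CLAIM (what is proved, stated in full; the proofs are below) =====
def Claim_equal_squared_sorted_array : Prop := ∀ (array : List Int) (S : Int), Dom_squared_sorted_array array S → Pre_squared_sorted_array array S → Spec_squared_sorted_array array S (squared_sorted_array array S)

-- ===== LEMMAS AND PROOFS =====

-- structural form of one inner bubble pass with fuel k (touches the first k+1 positions)
def pvBpass : Nat → List Int → List Int
  | 0, l => l
  | _ + 1, [] => []
  | _ + 1, [x] => [x]
  | k + 1, x :: y :: t => if x > y then y :: pvBpass k (x :: t) else x :: pvBpass k (y :: t)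

-- the whole bubble phase: pvPasses N c a applies passes with fuels N-1, N-2, …, N-c
def pvPasses (N : Nat) : Nat → List Int → List Int
  | 0, a => a
  | c + 1, a => pvBpass (N - (c + 1)) (pvPasses N c a)

theorem pvSwapStep_zero (x y : Int) (t : List Int) :
    pvSwapStep (x :: y :: t) 0 = if x > y then y :: x :: t else x :: y :: t := by
  simp [pvSwapStep, pysem]

theorem pvSwapStep_succ (h : Int) (t : List Int) (k : Nat) :
    pvSwapStep (h :: t) ((k : Int) + 1) = h :: pvSwapStep t (k : Int) := by
  have h1 : ((k : Int) + 1) = ((k + 1 : Nat) : Int) := by push_cast; ring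
  have h2 : ((k : Int) + 1 + 1) = ((k + 2 : Nat) : Int) := by push_cast; ring
  simp only [pvSwapStep]
  rw [h2, h1]
  simp only [PySem.List.pyGetD_natCast, PySem.List.pySetD_natCast,
    List.getD_cons_succ, List.set_cons_succ]
  split <;> rfl

theorem pvSwapStep_nil (j : Int) : pvSwapStep [] j = [] := by
  simp [pvSwapStep, PySem.List.pyGetD, PySem.List.pyGet?]

theorem pvFold_shift (L : List Nat) (h : Int) (t : List Int) :
    L.foldl (fun (a : List Int) (k : Nat) => pvSwapStep a ((k : Int) + 1)) (h :: t)
      = h :: L.foldl (fun (a : List Int) (k : Nat) => pvSwapStep a (k : Int)) t := by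
  induction L generalizing t with
  | nil => rfl
  | cons k L ih => simp only [List.foldl_cons, pvSwapStep_succ, ih]

theorem pvInner_eq_bpass (m : Nat) (a : List Int) (hm : m < a.length) :
    (PySem.List.pyRange 0 (m : Int)).foldl pvSwapStep a = pvBpass m a := by
  rw [PySem.List.pyRange_zero_natCast, List.foldl_map]
  induction m generalizing a with
  | zero => rfl
  | succ m ih =>
    match a, hm with
    | x :: y :: t, hm2 =>
      rw [List.range_succ_eq_map, List.foldl_cons, List.foldl_map]
      have hfun : (fun (x : List Int) (k : Nat) => pvSwapStep x ((Nat.succ k : Nat) : Int))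
          = fun (a : List Int) (k : Nat) => pvSwapStep a ((k : Int) + 1) := by
        funext a k
        have : ((Nat.succ k : Nat) : Int) = (k : Int) + 1 := by push_cast; ring
        rw [this]
      have h0 : pvSwapStep (x :: y :: t) ((0 : Nat) : Int)
          = if x > y then y :: x :: t else x :: y :: t := by
        exact_mod_cast pvSwapStep_zero x y t
      rw [hfun, h0]
      have hlen1 : m < (x :: t).length := by simp at hm2 ⊢; omega
      have hlen2 : m < (y :: t).length := by simp at hm2 ⊢; omega
      by_cases hxy : x > y
      · rw [if_pos hxy, pvFold_shift, ih _ hlen1]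
        simp [pvBpass, hxy]
      · rw [if_neg hxy, pvFold_shift, ih _ hlen2]
        simp [pvBpass, hxy]

theorem pvBpass_perm (k : Nat) (l : List Int) : (pvBpass k l).Perm l := by
  induction k generalizing l with
  | zero => exact List.Perm.refl _
  | succ k ih =>
    match l with
    | [] => exact List.Perm.refl _
    | [x] => exact List.Perm.refl _
    | x :: y :: t =>
      simp only [pvBpass]
      by_cases hxy : x > y
      · rw [if_pos hxy]
        exact ((ih (x :: t)).cons y).trans (List.Perm.swap x y t)
      · rw [if_neg hxy]
        exact (ih (y :: t)).cons x

theorem pvBpass_prefix (k : Nat) (p s : List Int) (h : k + 1 ≤ p.length) :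
    pvBpass k (p ++ s) = pvBpass k p ++ s := by
  induction k generalizing p with
  | zero => rfl
  | succ k ih =>
    match p, h with
    | x :: y :: t, h2 =>
      simp only [List.cons_append, pvBpass]
      by_cases hxy : x > y
      · rw [if_pos hxy, if_pos hxy, ← List.cons_append, ih (x :: t) (by simp at h2 ⊢; omega)]
        rfl
      · rw [if_neg hxy, if_neg hxy, ← List.cons_append, ih (y :: t) (by simp at h2 ⊢; omega)]
        rfl

theorem pvBpass_last (k : Nat) (p : List Int) (h : p.length = k + 1) :
    ∃ q M, pvBpass k p = q ++ [M] ∧ (∀ x ∈ q, x ≤ M) ∧ (∀ x ∈ p, x ≤ M) := by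
  induction k generalizing p with
  | zero =>
    match p, h with
    | [x], _ => exact ⟨[], x, rfl, by simp, by simp⟩
  | succ k ih =>
    match p, h with
    | x :: y :: t, h2 =>
      have hlen : (x :: t).length = k + 1 := by simp at h2 ⊢; omega
      have hlen' : (y :: t).length = k + 1 := by simp at h2 ⊢; omega
      by_cases hxy : x > y
      · obtain ⟨q, M, he, hq, hall⟩ := ih (x :: t) hlen
        refine ⟨y :: q, M, ?_, ?_, ?_⟩
        · simp only [pvBpass, if_pos hxy, he, List.cons_append]
        · intro z hz
          rcases List.mem_cons.mp hz with rfl | hz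
          · exact le_trans (le_of_lt hxy) (hall x (by simp))
          · exact hq z hz
        · intro z hz
          rcases List.mem_cons.mp hz with rfl | hz
          · exact hall z (by simp)
          · rcases List.mem_cons.mp hz with rfl | hz
            · exact le_trans (le_of_lt hxy) (hall x (by simp))
            · exact hall z (by simp [hz])
      · obtain ⟨q, M, he, hq, hall⟩ := ih (y :: t) hlen'
        refine ⟨x :: q, M, ?_, ?_, ?_⟩
        · simp only [pvBpass, if_neg hxy, he, List.cons_append]
        · intro z hz
          rcases List.mem_cons.mp hz with rfl | hz
          · exact le_trans (not_lt.mp hxy) (hall y (by simp))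
          · exact hq z hz
        · intro z hz
          rcases List.mem_cons.mp hz with rfl | hz
          · exact le_trans (not_lt.mp hxy) (hall y (by simp))
          · exact hall z hz

theorem pvPasses_spec (N c : Nat) (a : List Int) (ha : a.length = N) (hc : c + 1 ≤ N) :
    ∃ b s, pvPasses N c a = b ++ s ∧ b.length = N - c ∧ List.Pairwise (· ≤ ·) s ∧
      (∀ x ∈ b, ∀ y ∈ s, x ≤ y) ∧ (b ++ s).Perm a := by
  induction c with
  | zero => exact ⟨a, [], by simp [pvPasses], by omega, by simp, by simp, by simp⟩
  | succ c ih =>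
    obtain ⟨b, s, he, hb, hs, hcross, hperm⟩ := ih (by omega)
    have hb1 : b.length = (b.length - 1) + 1 := by omega
    obtain ⟨q, M, hq, hqM, hallM⟩ := pvBpass_last (b.length - 1) b hb1
    have hfuel : N - (c + 1) = b.length - 1 := by omega
    have hstep : pvPasses N (c + 1) a = (q ++ [M]) ++ s := by
      show pvBpass (N - (c + 1)) (pvPasses N c a) = _
      rw [he, hfuel, pvBpass_prefix _ b s (by omega), hq]
    have hqb : (q ++ [M]).Perm b := hq ▸ pvBpass_perm (b.length - 1) b
    have hMb : M ∈ b := hqb.mem_iff.mp (by simp)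
    have hqsub : ∀ z ∈ q, z ∈ b := fun z hz => hqb.mem_iff.mp (by simp [hz])
    have hlq := hqb.length_eq
    simp only [List.length_append, List.length_singleton] at hlq
    refine ⟨q, M :: s, by rw [hstep]; simp, by omega, ?_, ?_, ?_⟩
    · rw [List.pairwise_cons]
      exact ⟨fun y hy => hcross M hMb y hy, hs⟩
    · intro x hx y hy
      rcases List.mem_cons.mp hy with rfl | hy
      · exact hqM x hx
      · exact hcross x (hqsub x hx) y hy
    · have h1 : ((q ++ [M]) ++ s).Perm (b ++ s) := hqb.append_right s
      have h2 : (q ++ M :: s) = (q ++ [M]) ++ s := by simp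
      exact h2 ▸ (h1.trans hperm)

theorem pvPasses_length (N c : Nat) (a : List Int) : (pvPasses N c a).length = a.length := by
  induction c with
  | zero => rfl
  | succ c ih =>
    show (pvBpass (N - (c + 1)) (pvPasses N c a)).length = _
    rw [(pvBpass_perm _ _).length_eq, ih]

theorem pvOuter_eq_passes (N c : Nat) (a : List Int) (ha : a.length = N) (hc : c ≤ N - 1) :
    ((List.range c).map (fun (k : Nat) => (k : Int))).foldl (fun a i =>
        (PySem.List.pyRange 0 ((N : Int) - i - 1)).foldl pvSwapStep a) a
      = pvPasses N c a := by
  induction c with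
  | zero => rfl
  | succ c ih =>
    rw [List.range_succ, List.map_append, List.foldl_append, ih (by omega)]
    show (PySem.List.pyRange 0 ((N : Int) - (c : Int) - 1)).foldl pvSwapStep (pvPasses N c a)
        = pvBpass (N - (c + 1)) (pvPasses N c a)
    have hcast : (N : Int) - (c : Int) - 1 = ((N - (c + 1) : Nat) : Int) := by
      have : c + 1 ≤ N := by omega
      push_cast [Nat.cast_sub this]
      ring
    rw [hcast]
    exact pvInner_eq_bpass _ _ (by rw [pvPasses_length, ha]; omega)

theorem pvA_sorted_perm (sq : List Int) :
    List.Pairwise (· ≤ ·) ((PySem.List.pyRange 0 ((sq.length : Int) - 1)).foldl (fun a i =>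
        (PySem.List.pyRange 0 ((sq.length : Int) - i - 1)).foldl pvSwapStep a) sq)
    ∧ ((PySem.List.pyRange 0 ((sq.length : Int) - 1)).foldl (fun a i =>
        (PySem.List.pyRange 0 ((sq.length : Int) - i - 1)).foldl pvSwapStep a) sq).Perm sq := by
  rcases Nat.eq_zero_or_pos sq.length with h0 | hpos
  · rw [List.length_eq_zero_iff.mp h0]
    have hnil : ∀ L : List Int, L.foldl (fun a i =>
        (PySem.List.pyRange 0 ((([] : List Int).length : Int) - i - 1)).foldl pvSwapStep a) [] = [] := by
      intro L
      induction L with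
      | nil => rfl
      | cons x L ih =>
        rw [List.foldl_cons]
        have : ∀ R : List Int, R.foldl pvSwapStep [] = [] := by
          intro R; induction R with
          | nil => rfl
          | cons r R ihr => rw [List.foldl_cons, pvSwapStep_nil]; exact ihr
        rw [this]; exact ih
    rw [hnil]
    exact ⟨List.Pairwise.nil, List.Perm.refl _⟩
  · have hcast : (sq.length : Int) - 1 = ((sq.length - 1 : Nat) : Int) := by
      push_cast [Nat.cast_sub hpos]; ring
    rw [hcast, PySem.List.pyRange_zero_natCast,
      pvOuter_eq_passes sq.length (sq.length - 1) sq rfl (le_refl _)]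
    obtain ⟨b, s, he, hb, hs, hcross, hperm⟩ :=
      pvPasses_spec sq.length (sq.length - 1) sq rfl (by omega)
    have hb1 : b.length = 1 := by omega
    match b, hb1 with
    | [b0], _ =>
      rw [he]
      constructor
      · simp only [List.cons_append, List.nil_append]
        rw [List.pairwise_cons]
        exact ⟨fun y hy => hcross b0 (by simp) y hy, hs⟩
      · exact hperm

theorem pvMerge_perm (a b : List Int) : (pvMerge a b).Perm (a ++ b) := by
  fun_induction pvMerge with
  | case1 b => simp
  | case2 a h => simp
  | case3 x xs y ys hxy ih =>
    refine (ih.cons y).trans ?_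
    have : (x :: xs ++ y :: ys).Perm (y :: (x :: xs ++ ys)) := by
      simpa using (List.perm_middle (a := y) (l₁ := x :: xs) (l₂ := ys))
    exact this.symm
  | case4 x xs y ys hxy ih => simpa using ih.cons x

theorem pvMerge_mem (z : Int) (a b : List Int) (h : z ∈ pvMerge a b) : z ∈ a ∨ z ∈ b := by
  have := (pvMerge_perm a b).mem_iff.mp h
  simpa using this

theorem pvMerge_sorted (a b : List Int) (ha : List.Pairwise (· ≤ ·) a)
    (hb : List.Pairwise (· ≤ ·) b) : List.Pairwise (· ≤ ·) (pvMerge a b) := by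
  fun_induction pvMerge with
  | case1 b => exact hb
  | case2 a h => exact ha
  | case3 x xs y ys hxy ih =>
    rw [List.pairwise_cons] at hb ⊢
    refine ⟨?_, ih ha hb.2⟩
    intro z hz
    rcases pvMerge_mem z _ _ hz with hz | hz
    · rcases List.mem_cons.mp hz with rfl | hz
      · exact le_of_lt hxy
      · exact le_trans (le_of_lt hxy) ((List.pairwise_cons.mp ha).1 z hz)
    · exact hb.1 z hz
  | case4 x xs y ys hxy ih =>
    rw [List.pairwise_cons] at ha ⊢
    refine ⟨?_, ih ha.2 hb⟩
    intro z hz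
    rcases pvMerge_mem z _ _ hz with hz | hz
    · exact ha.1 z hz
    · rcases List.mem_cons.mp hz with rfl | hz
      · exact not_lt.mp hxy
      · exact le_trans (not_lt.mp hxy) ((List.pairwise_cons.mp hb).1 z hz)

theorem pvMsort_perm (l : List Int) : (pvMsort l).Perm l := by
  fun_induction pvMsort with
  | case1 l h => exact List.Perm.refl _
  | case2 l h ih1 ih2 =>
    refine (pvMerge_perm _ _).trans ?_
    refine ((ih1.append ih2).trans ?_)
    rw [List.take_append_drop]

theorem pvMsort_sorted (l : List Int) : List.Pairwise (· ≤ ·) (pvMsort l) := by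
  fun_induction pvMsort with
  | case1 l h =>
    match l, h with
    | [], _ => exact List.Pairwise.nil
    | [x], _ => simp
  | case2 l h ih1 ih2 => exact pvMerge_sorted _ _ ih1 ih2

theorem pvFoldl_filter (array : List Int) (m : Int) (acc : List Int) :
    array.foldl (fun acc num =>
      let square := num * num
      if 0 ≤ square ∧ square ≤ m then acc ++ [square] else acc) acc
    = acc ++ array.filterMap (fun num =>
        if 0 ≤ num * num ∧ num * num ≤ m then some (num * num) else none) := by
  induction array generalizing acc with
  | nil => simp
  | cons x xs ih =>
    rw [List.foldl_cons, List.filterMap_cons]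
    by_cases hx : 0 ≤ x * x ∧ x * x ≤ m <;> simp [hx, ih]

-- ===== VERDICT (by name: the statement is the Claim_ definition above) =====
theorem squared_sorted_array_spec : Claim_equal_squared_sorted_array := by
  intro array S _ _
  unfold Spec_squared_sorted_array squared_sorted_array squared_sorted_array_alt
  cases h : PySem.Int.ofStr? (PySem.Int.toStr S ++ PySem.Int.toStr S) with
  | none => rfl
  | some m =>
    simp only [pvFoldl_filter, List.nil_append]
    set sq := array.filterMap (fun num =>
      if 0 ≤ num * num ∧ num * num ≤ m then some (num * num) else none) with hsq
    obtain ⟨hApair, hAperm⟩ := pvA_sorted_perm sq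
    refine List.Perm.eq_of_pairwise ?_ hApair (pvMsort_sorted sq)
      (hAperm.trans (pvMsort_perm sq).symm)
    intro a b _ _ h1 h2
    omega
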